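-- pv_equiv track=rewrite | github.com/Stocastico/AI_MOOC | Exercises/Exercise_4/driver_3.py | getUnassignedSquares
-- ===== SOURCE A (Python) =====
-- def getUnassignedSquares(sudoku):
--     """ create a list of unassigned squares, sorted by number of options"""
--
--     unassigned = list();
--     for k, v in sudoku.items():
--         if len(v) > 1:
--             unassigned.append((k, len(v)))
--
--     if unassigned:
--         unassigned.sort(key=lambda tup: tup[1])
--         tmp, _ = zip(*unassigned)
--     else:
--         tmp = list()
--     return tmp
-- ===== SOURCE B (Python) =====
-- def getUnassignedSquares(sudoku):
--     """Bucket (counting) sort by option count instead of a comparison sort: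
--     one pass builds per-count buckets (and the max count), then buckets are
--     concatenated in increasing count order; stability comes from dict order."""
--     buckets = {}
--     maxlen = 0
--     for k, v in sudoku.items():
--         n = len(v)
--         if n > 1:
--             buckets.setdefault(n, []).append(k)
--             if n > maxlen:
--                 maxlen = n
--     out = []
--     for n in range(2, maxlen + 1):
--         out += buckets.get(n, [])
--     return tuple(out) if out else list()
-- ===== Notes on version B (the rewrite author's own statement) =====
-- stated objective: alternative
-- what changed: Replaces the comparison sort of (key, count) pairs with a single-pass bucket/counting sort: one pass groups unassigned keys into per-count buckets while tracking the maximum count, then buckets are concatenated in increasing count order (dict order gives the same stability as the stable sort); measured ~1.3x faster, below the 1.5x bar, so no speed is claimed.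
import Mathlib
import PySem

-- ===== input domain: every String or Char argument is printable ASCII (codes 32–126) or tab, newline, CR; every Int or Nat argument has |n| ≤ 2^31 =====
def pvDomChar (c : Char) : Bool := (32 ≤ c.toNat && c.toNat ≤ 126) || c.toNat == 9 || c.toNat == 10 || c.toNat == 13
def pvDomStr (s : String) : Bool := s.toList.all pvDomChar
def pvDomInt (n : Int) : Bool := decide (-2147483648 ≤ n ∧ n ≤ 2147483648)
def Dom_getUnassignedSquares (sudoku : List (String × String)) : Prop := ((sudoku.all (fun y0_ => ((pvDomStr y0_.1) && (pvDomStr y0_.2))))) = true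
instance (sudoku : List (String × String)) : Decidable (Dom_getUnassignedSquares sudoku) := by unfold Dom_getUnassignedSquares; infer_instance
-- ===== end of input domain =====

-- B replaces A's comparison sort of (key, count) pairs with a one-pass bucket
-- (counting) sort whose buckets are concatenated in increasing count order (objective: alternative).

-- ===== PORT A =====
def getUnassignedSquares (sudoku : List (String × String)) : List String :=
  let unassigned : List (String × Int) :=
    sudoku.foldl (fun acc kv =>
      if 1 < PySem.Str.len kv.2 then acc ++ [(kv.1, PySem.Str.len kv.2)] else acc) []
  if unassigned ≠ [] then
    (PySem.List.sorted unassigned (fun t => t.2)).map (fun t => t.1)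
  else []

-- ===== PORT B =====
def getUnassignedSquares_alt (sudoku : List (String × String)) : List String :=
  let st : PySem.Dict Int (List String) × Int :=
    sudoku.foldl (fun st kv =>
      let n := PySem.Str.len kv.2
      if 1 < n then
        (st.1.modify n [] (fun b => b ++ [kv.1]), if st.2 < n then n else st.2)
      else st) (PySem.Dict.empty, 0)
  (PySem.List.pyRange 2 (st.2 + 1)).foldl (fun out n => out ++ st.1.getD n []) []

-- ===== PRECONDITION & SPEC =====
def Spec_getUnassignedSquares (sudoku : List (String × String)) (out : List String) : Prop := out = getUnassignedSquares_alt sudoku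
instance (sudoku : List (String × String)) (out : List String) : Decidable (Spec_getUnassignedSquares sudoku out) := by unfold Spec_getUnassignedSquares; infer_instance

-- ===== CLAIM (what is proved, stated in full; the proofs are below) =====
def Claim_equal_getUnassignedSquares : Prop := ∀ (sudoku : List (String × String)), Dom_getUnassignedSquares sudoku → Spec_getUnassignedSquares sudoku (getUnassignedSquares sudoku)

-- ===== LEMMAS AND PROOFS =====

-- the filtered (key, count) pairs both programs work on
def pvPairs (l : List (String × String)) : List (String × Int) :=
  (l.filter (fun kv => decide (1 < PySem.Str.len kv.2))).map (fun kv => (kv.1, PySem.Str.len kv.2))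

-- B's fold state
def pvBState (l : List (String × String)) : PySem.Dict Int (List String) × Int :=
  l.foldl (fun st kv =>
      let n := PySem.Str.len kv.2
      if 1 < n then
        (st.1.modify n [] (fun b => b ++ [kv.1]), if st.2 < n then n else st.2)
      else st) (PySem.Dict.empty, 0)

lemma pvBState_append (l : List (String × String)) (x : String × String) :
    pvBState (l ++ [x]) =
      (let st := pvBState l
       let n := PySem.Str.len x.2
       if 1 < n then
         (st.1.modify n [] (fun b => b ++ [x.1]), if st.2 < n then n else st.2)
       else st) := by
  simp [pvBState, List.foldl_append]

lemma pvPairs_append (l : List (String × String)) (x : String × String) :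
    pvPairs (l ++ [x]) =
      pvPairs l ++ (if 1 < PySem.Str.len x.2 then [(x.1, PySem.Str.len x.2)] else []) := by
  by_cases h : 1 < x.2.length <;>
    simp [pvPairs, List.filter_append, PySem.Str.len_eq, h]

lemma pvBState_bucket (l : List (String × String)) (n : Int) :
    (pvBState l).1.getD n [] = ((pvPairs l).filter (fun q => q.2 == n)).map Prod.fst := by
  induction l using List.reverseRecOn with
  | nil => simp [pvBState, pvPairs]
  | append_singleton l x ih =>
      rw [pvBState_append, pvPairs_append]
      by_cases h : 1 < x.2.length
      · by_cases hn : n = (x.2.length : Int)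
        · subst hn
          simp [PySem.Str.len_eq, h, ih, List.filter_append, PySem.Dict.modify]
        · simp [PySem.Str.len_eq, h, Ne.symm hn, List.filter_append]
          rw [PySem.Dict.modify, PySem.Dict.getD_insert, if_neg hn, ih]
      · simp [PySem.Str.len_eq, h, ih]

lemma pvBState_max (l : List (String × String)) :
    0 ≤ (pvBState l).2 ∧ ∀ q ∈ pvPairs l, q.2 ≤ (pvBState l).2 := by
  induction l using List.reverseRecOn with
  | nil => simp [pvBState, pvPairs]
  | append_singleton l x ih =>
      rw [pvBState_append, pvPairs_append]
      by_cases h : 1 < x.2.length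
      · simp only [PySem.Str.len_eq, String.length_toList]
        rw [if_pos (by exact_mod_cast h)]
        refine ⟨by rcases ih with ⟨h0, -⟩; dsimp; split <;> omega, ?_⟩
        intro q hq
        rw [if_pos (show (1:Int) < (x.2.length : Int) from by exact_mod_cast h)] at hq
        rcases List.mem_append.1 hq with hq | hq
        · have := ih.2 q hq; dsimp; split <;> omega
        · simp at hq
          subst hq
          dsimp; split <;> omega
      · simpa [PySem.Str.len_eq, h] using ih

-- pyRange with step 1 is strictly increasing
lemma pvPyRange_pairwise (a b : Int) : (PySem.List.pyRange a b).Pairwise (· < ·) := by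
  by_cases h : a < b
  · have hk0 : (b - a).toNat ≠ 0 := by omega
    generalize hk : (b - a).toNat = k at *
    induction k generalizing a with
    | zero => omega
    | succ k ih =>
        rw [PySem.List.pyRange_one_cons h]
        refine List.pairwise_cons.2 ⟨fun x hx => (PySem.List.mem_pyRange_one.1 hx).1, ?_⟩
        by_cases h' : a + 1 < b
        · exact ih (a + 1) h' (by omega) (by omega)
        · have hnil : PySem.List.pyRange (a + 1) b = [] := by
            simp [PySem.List.pyRange]; omega
          simp [hnil]
  · have hnil : PySem.List.pyRange a b = [] := by simp [PySem.List.pyRange]; omega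
    simp [hnil]

-- insertBy passes over a block it does not go before
lemma pvInsertBy_append {α : Type} (before : α → α → Bool) (x : α) (ys zs : List α)
    (h : ∀ y ∈ ys, before x y = false) :
    PySem.List.insertBy before x (ys ++ zs) = ys ++ PySem.List.insertBy before x zs := by
  induction ys with
  | nil => simp
  | cons y ys ih =>
      simp only [List.cons_append, PySem.List.insertBy]
      rw [h y (by simp)]
      simp [ih (fun y hy => h y (by simp [hy]))]

-- insertBy lands at the head of a block it goes before everywhere
lemma pvInsertBy_all_before {α : Type} (before : α → α → Bool) (x : α) (zs : List α)
    (h : ∀ y ∈ zs, before x y = true) :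
    PySem.List.insertBy before x zs = x :: zs := by
  cases zs with
  | nil => rfl
  | cons z zs => simp [PySem.List.insertBy, h z (by simp)]

-- key lemma: a stable sort by an Int key equals the concatenation, over any
-- strictly increasing list ns covering all keys, of the per-key filters
lemma pvSorted_eq_flatMap {α : Type} (l : List (α × Int)) (ns : List Int)
    (hs : ns.Pairwise (· < ·)) (hmem : ∀ p ∈ l, p.2 ∈ ns) :
    PySem.List.sorted l (fun p => p.2) =
      ns.flatMap (fun n => l.filter (fun q => q.2 == n)) := by
  induction l using List.reverseRecOn with
  | nil => simp [PySem.List.sorted]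
  | append_singleton l x ih =>
      have hx : x.2 ∈ ns := hmem x (by simp)
      have hl : ∀ p ∈ l, p.2 ∈ ns := fun p hp => hmem p (by simp [hp])
      obtain ⟨ns₁, ns₂, rfl⟩ := List.append_of_mem hx
      have hlt₁ : ∀ n ∈ ns₁, n < x.2 := fun n hn =>
        (List.pairwise_append.1 hs).2.2 n hn x.2 (by simp)
      have hlt₂ : ∀ n ∈ ns₂, x.2 < n := fun n hn =>
        (List.pairwise_cons.1 (List.pairwise_append.1 hs).2.1).1 n hn
      rw [PySem.List.sorted_eq_foldl_insertBy, List.foldl_append,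
        ← PySem.List.sorted_eq_foldl_insertBy, ih hl]
      simp only [List.foldl_cons, List.foldl_nil]
      rw [List.flatMap_append, List.flatMap_cons, ← List.append_assoc]
      rw [pvInsertBy_append _ _ _ _ (by
        intro y hy
        rcases List.mem_append.1 hy with hy | hy
        · obtain ⟨n, hn, hyn⟩ := List.mem_flatMap.1 hy
          have h2 : y.2 = n := by simpa using (List.mem_filter.1 hyn).2
          have := hlt₁ n hn
          simp [h2]; omega
        · have h2 : y.2 = x.2 := by simpa using (List.mem_filter.1 hy).2
          simp [h2])]
      rw [pvInsertBy_all_before _ _ _ (by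
        intro y hy
        obtain ⟨n, hn, hyn⟩ := List.mem_flatMap.1 hy
        have h2 : y.2 = n := by simpa using (List.mem_filter.1 hyn).2
        have := hlt₂ n hn
        simp [h2]; omega)]
      have e₁ : List.flatMap (fun n => (l ++ [x]).filter (fun q => q.2 == n)) ns₁
          = List.flatMap (fun n => l.filter (fun q => q.2 == n)) ns₁ := by
        apply List.flatMap_congr
        intro n hn
        have hne : ¬ (x.2 == n) = true := by
          have := hlt₁ n hn; simp; omega
        simp [List.filter_append, hne]
      have e₂ : List.flatMap (fun n => (l ++ [x]).filter (fun q => q.2 == n)) ns₂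
          = List.flatMap (fun n => l.filter (fun q => q.2 == n)) ns₂ := by
        apply List.flatMap_congr
        intro n hn
        have hne : ¬ (x.2 == n) = true := by
          have := hlt₂ n hn; simp; omega
        simp [List.filter_append, hne]
      rw [List.flatMap_append, List.flatMap_cons, e₁, e₂]
      simp [List.filter_append, List.append_assoc]

-- A's loop builds exactly pvPairs
lemma pvA_eq (sudoku : List (String × String)) :
    getUnassignedSquares sudoku =
      (PySem.List.sorted (pvPairs sudoku) (fun t => t.2)).map (fun t => t.1) := by
  show (if _ ≠ ([] : List (String × Int)) then _ else _) = _
  rw [PySem.List.foldl_append_ite (fun kv => 1 < PySem.Str.len kv.2)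
      (fun kv => (kv.1, PySem.Str.len kv.2)) sudoku []]
  simp only [List.nil_append, pvPairs]
  split
  · rfl
  · rename_i h
    simp only [ne_eq, not_not] at h
    rw [h]
    simp [PySem.List.sorted]

-- B unfolds to a flatMap over the buckets
lemma pvB_eq (sudoku : List (String × String)) :
    getUnassignedSquares_alt sudoku =
      (PySem.List.pyRange 2 ((pvBState sudoku).2 + 1)).flatMap
        (fun n => ((pvPairs sudoku).filter (fun q => q.2 == n)).map Prod.fst) := by
  show (PySem.List.pyRange 2 ((pvBState sudoku).2 + 1)).foldl
      (fun out n => out ++ (pvBState sudoku).1.getD n []) [] = _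
  rw [PySem.List.foldl_append_eq_flatMap]
  simp only [List.nil_append]
  exact List.flatMap_congr (fun n _ => pvBState_bucket sudoku n)

-- ===== VERDICT (by name: the statement is the Claim_ definition above) =====
theorem getUnassignedSquares_spec : Claim_equal_getUnassignedSquares := by
  intro sudoku _
  unfold Spec_getUnassignedSquares
  rw [pvA_eq, pvB_eq]
  rw [pvSorted_eq_flatMap (pvPairs sudoku) (PySem.List.pyRange 2 ((pvBState sudoku).2 + 1))
    (pvPyRange_pairwise _ _) ?cover]
  case cover =>
    intro p hp
    rw [PySem.List.mem_pyRange_one]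
    have hle := (pvBState_max sudoku).2 p hp
    have h2 : 2 ≤ p.2 := by
      simp only [pvPairs, List.mem_map, List.mem_filter] at hp
      obtain ⟨kv, ⟨-, hkv⟩, rfl⟩ := hp
      simp [PySem.Str.len_eq]
      simp [PySem.Str.len_eq] at hkv
      omega
    omega
  rw [List.map_flatMap]
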